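-- pv_equiv track=rewrite | github.com/gidabrams23/COT_Freight_Optimization_Tool | services/optimizer.py | _check_stacking_compatible
-- ===== SOURCE A (Python) =====
-- def _check_stacking_compatible(groups):
--     categories = []
--     for group in groups:
--         categories.extend(group.get("categories") or [])
--     categories = [cat for cat in categories if cat]
--     if not categories:
--         return True
--     if "DUMP" in categories and len(set(categories)) > 1:
--         return False
--     return True
-- ===== SOURCE B (Python) =====
-- def _check_stacking_compatible(groups):
--     has_dump = False
--     has_other = False
--     for group in groups:
--         for cat in group.get("categories") or []:
--             if not cat:
--                 continue
--             if cat == "DUMP":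
--                 has_dump = True
--             else:
--                 has_other = True
--             if has_dump and has_other:
--                 return False
--     return True
-- ===== Notes on version B (the rewrite author's own statement) =====
-- stated objective: alternative
-- what changed: Replaces building a full category list plus a membership test and a set-cardinality check with a single streaming pass maintaining two booleans (has_dump/has_other) that returns False as soon as both are seen.
import Mathlib
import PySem

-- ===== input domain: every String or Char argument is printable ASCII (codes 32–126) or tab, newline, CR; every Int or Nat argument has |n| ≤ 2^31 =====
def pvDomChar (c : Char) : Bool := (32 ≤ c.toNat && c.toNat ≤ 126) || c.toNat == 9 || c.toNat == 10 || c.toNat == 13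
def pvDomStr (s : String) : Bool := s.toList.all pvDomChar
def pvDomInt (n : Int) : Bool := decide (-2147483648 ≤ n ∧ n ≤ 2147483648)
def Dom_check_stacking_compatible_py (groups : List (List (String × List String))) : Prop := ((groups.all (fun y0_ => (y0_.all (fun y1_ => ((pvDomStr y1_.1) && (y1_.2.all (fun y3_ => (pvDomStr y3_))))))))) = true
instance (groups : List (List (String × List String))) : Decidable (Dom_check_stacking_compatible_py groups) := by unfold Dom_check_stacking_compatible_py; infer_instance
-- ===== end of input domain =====

-- B replaces A's collected-list + set-cardinality check by a single early-exit two-flag scan (alternative decomposition, same cost).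


-- ===== PORT A =====
-- group.get("categories") or []  →  (Dict.get? …).getD []   (None and the falsy [] both give [])
def check_stacking_compatible_py (groups : List (List (String × List String))) : Bool :=
  let categories0 := groups.foldl (fun acc g => acc ++ ((PySem.Dict.ofList g).get? "categories").getD []) []
  let categories := categories0.filter (fun c => c ≠ "")
  if categories = [] then true
  else if "DUMP" ∈ categories ∧ (PySem.Set.ofList categories).length > 1 then false
  else true

-- ===== PORT B =====
-- inner loop over one group's categories; none = early 'return False'
def pvAltCats : List String → Bool → Bool → Option (Bool × Bool)
  | [], hd, ho => some (hd, ho)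
  | c :: cs, hd, ho =>
    if c = "" then pvAltCats cs hd ho
    else
      let hd' := if c = "DUMP" then true else hd
      let ho' := if c ≠ "DUMP" then true else ho
      if hd' && ho' then none else pvAltCats cs hd' ho'

def pvAltGroups : List (List (String × List String)) → Bool → Bool → Bool
  | [], _, _ => true
  | g :: gs, hd, ho =>
    match pvAltCats (((PySem.Dict.ofList g).get? "categories").getD []) hd ho with
    | none => false
    | some (hd', ho') => pvAltGroups gs hd' ho'

def check_stacking_compatible_py_alt (groups : List (List (String × List String))) : Bool :=
  pvAltGroups groups false false

-- ===== PRECONDITION & SPEC =====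
def Spec_check_stacking_compatible_py (groups : List (List (String × List String))) (out : Bool) : Prop := out = check_stacking_compatible_py_alt groups
instance (groups : List (List (String × List String))) (out : Bool) : Decidable (Spec_check_stacking_compatible_py groups out) := by unfold Spec_check_stacking_compatible_py; infer_instance

-- ===== CLAIM (what is proved, stated in full; the proofs are below) =====
def Claim_equal_check_stacking_compatible_py : Prop := ∀ (groups : List (List (String × List String))), Dom_check_stacking_compatible_py groups → Spec_check_stacking_compatible_py groups (check_stacking_compatible_py groups)

-- ===== LEMMAS AND PROOFS =====
def pvDump (c : String) : Bool := c == "DUMP"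
def pvOther (c : String) : Bool := !(c == "") && !(c == "DUMP")
def pvFlat (groups : List (List (String × List String))) : List String :=
  groups.flatMap (fun g => ((PySem.Dict.ofList g).get? "categories").getD [])

theorem pvAltCats_spec (cs : List String) (hd ho : Bool) (h : ¬(hd = true ∧ ho = true)) :
    pvAltCats cs hd ho =
      if (hd || cs.any pvDump) && (ho || cs.any pvOther) then none
      else some (hd || cs.any pvDump, ho || cs.any pvOther) := by
  induction cs generalizing hd ho with
  | nil =>
    cases hd <;> cases ho <;> simp_all [pvAltCats]
  | cons c cs ih =>
    by_cases hce : c = ""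
    · subst hce
      simp [pvAltCats, pvDump, pvOther, ih _ _ h]
    · by_cases hcd : c = "DUMP"
      · subst hcd
        cases ho with
        | true =>
          simp_all [pvAltCats, pvDump]
        | false =>
          have hO : pvOther "DUMP" = false := by decide
          simp [pvAltCats, hce, pvDump, hO, ih true false (by simp)]
      · cases hd with
        | true =>
          simp_all [pvAltCats, pvDump, pvOther]
        | false =>
          have hD : pvDump c = false := by simp [pvDump, hcd]
          have hO : pvOther c = true := by simp [pvOther, hce, hcd]
          simp [pvAltCats, hce, hcd, hD, hO, ih false true (by simp)]

theorem pvAltGroups_spec (gs : List (List (String × List String))) (hd ho : Bool)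
    (h : ¬(hd = true ∧ ho = true)) :
    pvAltGroups gs hd ho =
      !((hd || (pvFlat gs).any pvDump) && (ho || (pvFlat gs).any pvOther)) := by
  induction gs generalizing hd ho with
  | nil =>
    cases hd <;> cases ho <;> simp_all [pvAltGroups, pvFlat]
  | cons g gs ih =>
    rw [pvAltGroups, pvAltCats_spec _ _ _ h]
    by_cases hb : ((hd || ((((PySem.Dict.ofList g).get? "categories").getD []).any pvDump)) &&
        (ho || ((((PySem.Dict.ofList g).get? "categories").getD []).any pvOther))) = true
    · rw [if_pos hb]
      simp only [Bool.and_eq_true, Bool.or_eq_true] at hb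
      simp only [pvFlat, List.flatMap_cons, List.any_append]
      rcases hb with ⟨h1, h2⟩
      rcases h1 with h1 | h1 <;> rcases h2 with h2 | h2 <;> simp [h1, h2]
    · rw [if_neg (by simpa using hb)]
      have hnb : ¬(((hd || (((PySem.Dict.ofList g).get? "categories").getD []).any pvDump) = true) ∧
          ((ho || (((PySem.Dict.ofList g).get? "categories").getD []).any pvOther) = true)) := by
        intro hc; exact hb (by simp [hc.1, hc.2])
      show pvAltGroups gs (hd || (((PySem.Dict.ofList g).get? "categories").getD []).any pvDump)
          (ho || (((PySem.Dict.ofList g).get? "categories").getD []).any pvOther) = _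
      rw [ih _ _ hnb]
      simp [pvFlat, List.flatMap_cons, List.any_append, Bool.or_assoc]

theorem pvNodup_all_eq_length_le {s : List String} (a : String) (hnd : s.Nodup)
    (hall : ∀ c ∈ s, c = a) : s.length ≤ 1 := by
  match s with
  | [] => simp
  | [x] => simp
  | x :: y :: t =>
    have hx : x = a := hall x (by simp)
    have hy : y = a := hall y (by simp)
    rw [List.nodup_cons] at hnd
    exact absurd (by simp [hx, hy]) hnd.1

theorem pvSetLen_iff (cs : List String) (hmem : "DUMP" ∈ cs) :
    ((PySem.Set.ofList cs).length > 1) ↔ ∃ c ∈ cs, c ≠ "DUMP" := by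
  constructor
  · intro hlen
    by_contra hno
    push Not at hno
    have : (PySem.Set.ofList cs).length ≤ 1 :=
      pvNodup_all_eq_length_le "DUMP" (PySem.Set.nodup_ofList cs)
        (fun c hc => hno c ((PySem.Set.mem_ofList cs c).mp hc))
    omega
  · rintro ⟨c, hc, hcne⟩
    have h1 : "DUMP" ∈ PySem.Set.ofList cs := (PySem.Set.mem_ofList cs "DUMP").mpr hmem
    have h2 : c ∈ PySem.Set.ofList cs := (PySem.Set.mem_ofList cs c).mpr hc
    match hs : PySem.Set.ofList cs with
    | [] => rw [hs] at h1; simp at h1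
    | [x] =>
      rw [hs] at h1 h2
      simp at h1 h2
      exact absurd (h2.trans h1.symm) hcne
    | x :: y :: t => simp

-- ===== VERDICT (by name: the statement is the Claim_ definition above) =====
theorem check_stacking_compatible_py_spec : Claim_equal_check_stacking_compatible_py := by
  intro groups _
  unfold Spec_check_stacking_compatible_py check_stacking_compatible_py check_stacking_compatible_py_alt
  rw [pvAltGroups_spec _ _ _ (by simp)]
  simp only [PySem.List.foldl_append_eq_flatMap, List.nil_append]
  have hflat' : groups.flatMap (fun g => ((PySem.Dict.ofList g).get? "categories").getD []) = pvFlat groups := rfl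
  rw [hflat']
  set flat := pvFlat groups with hflat
  set cs := flat.filter (fun c => c ≠ "") with hcs
  have hd_iff : flat.any pvDump = true ↔ "DUMP" ∈ cs := by
    simp only [pvDump, hcs, List.any_eq_true, List.mem_filter, beq_iff_eq]
    constructor
    · rintro ⟨a, ha, rfl⟩; exact ⟨ha, by decide⟩
    · rintro ⟨ha, _⟩; exact ⟨"DUMP", ha, rfl⟩
  have ho_iff : flat.any pvOther = true ↔ ∃ c ∈ cs, c ≠ "DUMP" := by
    simp only [pvOther, hcs, List.any_eq_true, List.mem_filter, Bool.and_eq_true,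
      Bool.not_eq_true', beq_eq_false_iff_ne, ne_eq, decide_eq_true_eq]
    constructor
    · rintro ⟨a, ha, h1, h2⟩; exact ⟨a, ⟨ha, h1⟩, h2⟩
    · rintro ⟨a, ⟨ha, h1⟩, h2⟩; exact ⟨a, ha, h1, h2⟩
  by_cases hnil : cs = []
  · have hD : flat.any pvDump = false := by
      rw [Bool.eq_false_iff]; intro hc; rcases hd_iff.mp hc with h; simp [hnil] at h
    simp [hnil, hD]
  · rw [if_neg hnil]
    by_cases hm : "DUMP" ∈ cs
    · have hD : flat.any pvDump = true := hd_iff.mpr hm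
      by_cases hex : ∃ c ∈ cs, c ≠ "DUMP"
      · have hO : flat.any pvOther = true := ho_iff.mpr hex
        rw [if_pos ⟨hm, (pvSetLen_iff cs hm).mpr hex⟩]
        simp [hD, hO]
      · have hO : flat.any pvOther = false := by
          rw [Bool.eq_false_iff]; exact fun hc => hex (ho_iff.mp hc)
        rw [if_neg (fun hc => hex ((pvSetLen_iff cs hm).mp hc.2))]
        simp [hD, hO]
    · have hD : flat.any pvDump = false := by
        rw [Bool.eq_false_iff]; exact fun hc => hm (hd_iff.mp hc)
      rw [if_neg (fun hc => hm hc.1)]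
      simp [hD]
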